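-- pv_equiv track=rewrite | github.com/MischaDy/AoC-2022 | Day8/day8.py | get_visibles_l2r
-- ===== SOURCE A (Python) =====
-- from typing import Set, Tuple
--
-- def get_visibles_l2r(heights) -> Set[Tuple[int, int]]:
--     visibles = set()
--     for row, line in enumerate(heights):
--         cur_row_max = float('-inf')
--         for col, height in enumerate(line):
--             if height > cur_row_max:
--                 visibles.add((row, col))
--                 cur_row_max = height
--     return visibles
-- ===== SOURCE B (Python) =====
-- def _prefix_maxima(line):
--     maxes = []
--     for h in line:
--         maxes.append(h if not maxes else max(maxes[-1], h))
--     return maxes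
--
--
-- def get_visibles_l2r(heights):
--     visibles = set()
--     for row, line in enumerate(heights):
--         maxes = _prefix_maxima(line)
--         for col, height in enumerate(line):
--             if col == 0 or height > maxes[col - 1]:
--                 visibles.add((row, col))
--     return visibles
-- ===== Notes on version B (the rewrite author's own statement) =====
-- stated objective: alternative
-- what changed: Replaces A's fused inline running-max loop with a build-table-then-compare decomposition: each row first materialises its prefix-maxima table, then a second pass marks (row, col) visible when col == 0 or height > maxes[col-1].
import Mathlib
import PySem

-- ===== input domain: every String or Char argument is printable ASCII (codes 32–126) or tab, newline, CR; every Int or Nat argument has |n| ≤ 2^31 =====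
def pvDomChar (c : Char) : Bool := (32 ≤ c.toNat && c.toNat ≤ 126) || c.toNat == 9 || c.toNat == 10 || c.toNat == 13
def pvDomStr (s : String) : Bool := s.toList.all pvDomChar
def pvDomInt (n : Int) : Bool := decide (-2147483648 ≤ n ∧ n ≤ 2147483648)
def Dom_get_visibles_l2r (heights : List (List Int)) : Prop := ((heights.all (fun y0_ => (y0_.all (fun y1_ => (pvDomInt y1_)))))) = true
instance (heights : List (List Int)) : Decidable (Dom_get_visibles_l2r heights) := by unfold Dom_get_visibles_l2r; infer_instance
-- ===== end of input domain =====

-- B replaces A's fused running-max loop by a per-row build-table-then-compare decomposition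
-- (prefix-maxima table first, then a second pass comparing each height with maxes[col-1]);
-- same asymptotic cost, alternative structure.

-- ===== PORT A =====
-- cur_row_max = float('-inf') is modelled as `none` (no int compares ≤ -inf, and the very
-- first comparison `height > -inf` is always true, exactly the `none` branch).
def get_visibles_l2r (heights : List (List Int)) : List (Int × Int) :=
  (PySem.List.enumerate heights).foldl
    (fun vis rl =>
      ((PySem.List.enumerate rl.2).foldl
        (fun (st : List (Int × Int) × Option Int) ch =>
          if (match st.2 with
              | none => true
              | some m => decide (m < ch.2)) then
            (PySem.Set.add st.1 (rl.1, ch.1), some ch.2)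
          else st)
        (vis, none)).1)
    []

-- ===== PORT B =====
-- maxes[-1] in Source B is guarded by `if not maxes`, and maxes[col-1] by `col == 0 or`,
-- so both indexings are always in range; the total pyGetD with default 0 is exact here.
def prefixMaxima (line : List Int) : List Int :=
  line.foldl
    (fun maxes h =>
      maxes ++ [if maxes.isEmpty then h else max (PySem.List.pyGetD maxes (-1) 0) h])
    []

def get_visibles_l2r_alt (heights : List (List Int)) : List (Int × Int) :=
  (PySem.List.enumerate heights).foldl
    (fun vis rl =>
      let maxes := prefixMaxima rl.2
      (PySem.List.enumerate rl.2).foldl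
        (fun vis ch =>
          if ch.1 == 0 || decide (PySem.List.pyGetD maxes (ch.1 - 1) 0 < ch.2) then
            PySem.Set.add vis (rl.1, ch.1)
          else vis)
        vis)
    []

-- ===== PRECONDITION & SPEC =====
def Spec_get_visibles_l2r (heights : List (List Int)) (out : List (Int × Int)) : Prop := out = get_visibles_l2r_alt heights
instance (heights : List (List Int)) (out : List (Int × Int)) : Decidable (Spec_get_visibles_l2r heights out) := by unfold Spec_get_visibles_l2r; infer_instance

-- ===== CLAIM (what is proved, stated in full; the proofs are below) =====
def Claim_equal_get_visibles_l2r : Prop := ∀ (heights : List (List Int)), Dom_get_visibles_l2r heights → Spec_get_visibles_l2r heights (get_visibles_l2r heights)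

-- ===== LEMMAS AND PROOFS =====

-- proof-side structural form of the prefix-maxima table
def accMaxFrom (m : Int) : List Int → List Int
  | [] => []
  | h :: t => max m h :: accMaxFrom (max m h) t

theorem pm_loop (t : List Int) : ∀ (acc : List Int) (m : Int), acc.getLast? = some m →
    t.foldl
      (fun maxes h =>
        maxes ++ [if maxes.isEmpty then h else max (PySem.List.pyGetD maxes (-1) 0) h])
      acc
    = acc ++ accMaxFrom m t := by
  induction t with
  | nil => intro acc m _; simp [accMaxFrom]
  | cons h t ih =>
    intro acc m hm
    have hne : acc ≠ [] := by rintro rfl; simp at hm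
    have hlast : acc.getLast hne = m := by
      have h2 := List.getLast?_eq_some_getLast (l := acc) hne
      rw [h2] at hm; exact Option.some.inj hm
    simp only [List.foldl_cons]
    rw [if_neg (by simpa [List.isEmpty_iff] using hne),
        PySem.List.pyGetD_neg_one (h := hne), hlast,
        ih (acc ++ [max m h]) (max m h) (by simp), List.append_assoc]
    rfl

theorem prefixMaxima_cons (h : Int) (t : List Int) :
    prefixMaxima (h :: t) = h :: accMaxFrom h t := by
  unfold prefixMaxima
  simp only [List.foldl_cons, List.isEmpty_nil, if_true, List.nil_append]
  exact pm_loop t [h] h rfl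

theorem accMaxFrom_getElem? (t : List Int) : ∀ (m : Int) (i : Nat), i < t.length →
    (accMaxFrom m t)[i]? = some (List.foldl max m (t.take (i + 1))) := by
  induction t with
  | nil => intro m i hi; simp at hi
  | cons h t ih =>
    intro m i hi
    cases i with
    | zero => simp [accMaxFrom]
    | succ i =>
      simp only [accMaxFrom, List.getElem?_cons_succ, List.take_succ_cons, List.foldl_cons]
      exact ih (max m h) i (by simp at hi; omega)

theorem inner_eq (row : Int) (maxes : List Int) (t : List Int) :
    ∀ (j m : Int) (vis : List (Int × Int)), 1 ≤ j →
    (∀ i : Nat, i < t.length →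
        PySem.List.pyGetD maxes (j + (i : Int) - 1) 0 = List.foldl max m (t.take i)) →
    ((PySem.List.enumerate t j).foldl
        (fun (st : List (Int × Int) × Option Int) ch =>
          if (match st.2 with
              | none => true
              | some m => decide (m < ch.2)) then
            (PySem.Set.add st.1 (row, ch.1), some ch.2)
          else st)
        (vis, some m)).1
    = (PySem.List.enumerate t j).foldl
        (fun vis ch =>
          if ch.1 == 0 || decide (PySem.List.pyGetD maxes (ch.1 - 1) 0 < ch.2) then
            PySem.Set.add vis (row, ch.1)
          else vis)
        vis := by
  induction t with
  | nil => intro j m vis _ _; simp [PySem.List.enumerate]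
  | cons h t ih =>
    intro j m vis hj H
    have h0 : PySem.List.pyGetD maxes (j - 1) 0 = m := by
      have := H 0 (by simp); simpa using this
    have hjne : (j == 0) = false := by simp; omega
    rw [PySem.List.enumerate_cons, List.foldl_cons, List.foldl_cons]
    simp only [hjne, Bool.false_or, h0]
    have Hnext : ∀ (m' : Int), max m h = m' →
        ∀ i : Nat, i < t.length →
          PySem.List.pyGetD maxes ((j + 1) + (i : Int) - 1) 0 = List.foldl max m' (t.take i) := by
      intro m' hm' i hi
      have := H (i + 1) (by simpa using Nat.succ_lt_succ hi)
      have harith : j + ((i : Nat) + 1 : Nat) - 1 = (j + 1) + (i : Int) - 1 := by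
        push_cast; ring
      rw [harith] at this
      simpa [hm'] using this
    simp only [decide_eq_true_eq]
    by_cases hc : m < h
    · rw [if_pos hc, if_pos hc]
      exact ih (j + 1) h _ (by omega) (Hnext h (max_eq_right hc.le))
    · rw [if_neg hc, if_neg hc]
      exact ih (j + 1) m vis (by omega) (Hnext m (max_eq_left (not_lt.mp hc)))

theorem row_eq (row : Int) (line : List Int) (vis : List (Int × Int)) :
    ((PySem.List.enumerate line).foldl
        (fun (st : List (Int × Int) × Option Int) ch =>
          if (match st.2 with
              | none => true
              | some m => decide (m < ch.2)) then
            (PySem.Set.add st.1 (row, ch.1), some ch.2)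
          else st)
        (vis, none)).1
    = (PySem.List.enumerate line).foldl
        (fun vis ch =>
          if ch.1 == 0 || decide (PySem.List.pyGetD (prefixMaxima line) (ch.1 - 1) 0 < ch.2) then
            PySem.Set.add vis (row, ch.1)
          else vis)
        vis := by
  cases line with
  | nil => rfl
  | cons h t =>
    rw [PySem.List.enumerate_cons, List.foldl_cons, List.foldl_cons]
    simp only [beq_self_eq_true, Bool.true_or, if_true]
    apply inner_eq row (prefixMaxima (h :: t)) t 1 h _ (by omega)
    intro i hi
    have harith : (1 : Int) + (i : Int) - 1 = ((i : Nat) : Int) := by ring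
    rw [harith, PySem.List.pyGetD_natCast, prefixMaxima_cons]
    cases i with
    | zero => simp
    | succ i =>
      simp only [List.getD, List.getElem?_cons_succ]
      rw [accMaxFrom_getElem? t h i (by omega)]
      simp

theorem outer_eq (hs : List (List Int)) : ∀ (s : Int) (vis : List (Int × Int)),
    (PySem.List.enumerate hs s).foldl
      (fun vis rl =>
        ((PySem.List.enumerate rl.2).foldl
          (fun (st : List (Int × Int) × Option Int) ch =>
            if (match st.2 with
                | none => true
                | some m => decide (m < ch.2)) then
              (PySem.Set.add st.1 (rl.1, ch.1), some ch.2)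
            else st)
          (vis, none)).1)
      vis
    = (PySem.List.enumerate hs s).foldl
        (fun vis rl =>
          let maxes := prefixMaxima rl.2
          (PySem.List.enumerate rl.2).foldl
            (fun vis ch =>
              if ch.1 == 0 || decide (PySem.List.pyGetD maxes (ch.1 - 1) 0 < ch.2) then
                PySem.Set.add vis (rl.1, ch.1)
              else vis)
            vis)
        vis := by
  induction hs with
  | nil => intro s vis; rfl
  | cons line hs ih =>
    intro s vis
    rw [PySem.List.enumerate_cons, List.foldl_cons, List.foldl_cons]
    have h1 := row_eq s line vis
    have h2 := ih (s + 1)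
      (((PySem.List.enumerate line).foldl
        (fun (st : List (Int × Int) × Option Int) ch =>
          if (match st.2 with
              | none => true
              | some m => decide (m < ch.2)) then
            (PySem.Set.add st.1 (s, ch.1), some ch.2)
          else st)
        (vis, none)).1)
    conv at h2 => rhs; rw [h1]
    exact h2

-- ===== VERDICT (by name: the statement is the Claim_ definition above) =====
theorem get_visibles_l2r_spec : Claim_equal_get_visibles_l2r := by
  intro heights _
  unfold Spec_get_visibles_l2r get_visibles_l2r get_visibles_l2r_alt
  exact outer_eq heights 0 []
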